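-- pv_equiv track=rewrite | github.com/markwu53/planar-geometry-algebra | polynomial.py | pd1
-- ===== SOURCE A (Python) =====
-- def pd1(p2, X, Y):
--     result = []
--     for i in range(X):
--         for j in range(Y):
--             if (i,j) in p2:
--                 result.append(p2[(i,j)])
--             else:
--                 result.append(0)
--     return result
-- ===== SOURCE B (Python) =====
-- def pd1(p2, X, Y):
--     if X <= 0 or Y <= 0:
--         return []
--     result = [0] * (X * Y)
--     for (i, j), v in p2.items():
--         if 0 <= i < X and 0 <= j < Y:
--             result[i * Y + j] = v
--     return result
-- ===== Notes on version B (the rewrite author's own statement) =====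
-- stated objective: faster
-- what changed: B preallocates a dense zero buffer of size X*Y and scatters the sparse dict entries into flat positions i*Y+j, instead of scanning every grid cell and testing dict membership per cell.
import Mathlib
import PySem

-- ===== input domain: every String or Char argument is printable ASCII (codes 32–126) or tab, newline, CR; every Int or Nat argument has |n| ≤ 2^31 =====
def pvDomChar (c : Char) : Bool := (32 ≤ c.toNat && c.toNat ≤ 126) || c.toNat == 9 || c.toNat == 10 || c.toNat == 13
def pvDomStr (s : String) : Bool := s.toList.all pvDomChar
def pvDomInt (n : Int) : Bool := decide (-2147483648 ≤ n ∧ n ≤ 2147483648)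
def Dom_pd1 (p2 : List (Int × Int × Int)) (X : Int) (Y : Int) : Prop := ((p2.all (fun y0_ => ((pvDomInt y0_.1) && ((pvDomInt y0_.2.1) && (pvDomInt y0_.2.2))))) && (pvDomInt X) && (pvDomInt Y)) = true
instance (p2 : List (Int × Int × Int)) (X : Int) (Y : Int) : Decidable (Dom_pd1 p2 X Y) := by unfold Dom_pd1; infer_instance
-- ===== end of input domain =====

-- B replaces A's full-grid scan with a per-cell dict membership test by a dense zero
-- buffer of size X*Y into which the dict entries are scattered at flat index i*Y+j.

-- the dict parameter p2 arrives as an association list; both ports first rebuild the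
-- Python dict from it (insertion order, a later duplicate key overwrites)
def pvToDict (p2 : List (Int × Int × Int)) : PySem.Dict (Int × Int) Int :=
  PySem.Dict.ofList (p2.map fun e => ((e.1, e.2.1), e.2.2))

-- ===== PORT A =====
def pd1 (p2 : List (Int × Int × Int)) (X : Int) (Y : Int) : List Int :=
  let d := pvToDict p2
  (PySem.List.pyRange 0 X 1).foldl (fun result i =>
    (PySem.List.pyRange 0 Y 1).foldl (fun result j =>
      if d.contains (i, j) then result ++ [d.getD (i, j) 0] else result ++ [0])
      result) []

-- ===== PORT B =====
-- result[i*Y+j] = v  (the index is nonnegative and in range under the guard)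
def pvScatter (X Y : Int) (r : List Int) (e : (Int × Int) × Int) : List Int :=
  if 0 ≤ e.1.1 ∧ e.1.1 < X ∧ 0 ≤ e.1.2 ∧ e.1.2 < Y then
    r.set (e.1.1 * Y + e.1.2).toNat e.2
  else r

def pd1_alt (p2 : List (Int × Int × Int)) (X : Int) (Y : Int) : List Int :=
  if X ≤ 0 ∨ Y ≤ 0 then []
  else (pvToDict p2).items.foldl (pvScatter X Y) (List.replicate (X * Y).toNat 0)

-- ===== PRECONDITION & SPEC =====
def Spec_pd1 (p2 : List (Int × Int × Int)) (X : Int) (Y : Int) (out : List Int) : Prop := out = pd1_alt p2 X Y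
instance (p2 : List (Int × Int × Int)) (X : Int) (Y : Int) (out : List Int) : Decidable (Spec_pd1 p2 X Y out) := by unfold Spec_pd1; infer_instance

-- ===== CLAIM (what is proved, stated in full; the proofs are below) =====
def Claim_equal_pd1 : Prop := ∀ (p2 : List (Int × Int × Int)) (X : Int) (Y : Int), Dom_pd1 p2 X Y → Spec_pd1 p2 X Y (pd1 p2 X Y)

-- ===== LEMMAS AND PROOFS =====

theorem foldl_const {α β : Type} (l : List α) (b : β) :
    l.foldl (fun r _ => r) b = b := by
  induction l generalizing b with
  | nil => rfl
  | cons x t ih => exact ih b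

theorem pvScatter_length (X Y : Int) (b : List Int) (e : (Int × Int) × Int) :
    (pvScatter X Y b e).length = b.length := by
  unfold pvScatter; split <;> simp

theorem scatter_foldl_length (X Y : Int) (l : List ((Int × Int) × Int)) (b : List Int) :
    (l.foldl (pvScatter X Y) b).length = b.length := by
  induction l generalizing b with
  | nil => rfl
  | cons e t ih => simp only [List.foldl_cons]; rw [ih, pvScatter_length]

-- if no entry of l targets flat slot n, the fold leaves slot n unchanged
theorem scatter_getElem?_of_none (X Y : Int) (l : List ((Int × Int) × Int)) (b : List Int) (n : Nat)
    (h : ∀ e ∈ l, (0 ≤ e.1.1 ∧ e.1.1 < X ∧ 0 ≤ e.1.2 ∧ e.1.2 < Y) → (e.1.1 * Y + e.1.2).toNat ≠ n) :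
    (l.foldl (pvScatter X Y) b)[n]? = b[n]? := by
  induction l generalizing b with
  | nil => rfl
  | cons e t ih =>
      simp only [List.foldl_cons]
      rw [ih _ (fun e' he' => h e' (List.mem_cons_of_mem _ he'))]
      unfold pvScatter
      split
      · next hc => rw [List.getElem?_set_ne (h e List.mem_cons_self hc)]
      · rfl

-- an in-range entry with flat index i*Y+j determines (i, j) as (div, mod)
theorem flat_key (Y I J : Int) (hY : 0 < Y) (hJ0 : 0 ≤ J) (hJY : J < Y) :
    (I * Y + J) / Y = I ∧ (I * Y + J) % Y = J := by
  constructor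
  · rw [add_comm, Int.add_mul_ediv_right _ _ (by omega : Y ≠ 0),
      Int.ediv_eq_zero_of_lt hJ0 hJY]
    omega
  · have : (I * Y + J) % Y = J % Y := by
      conv_lhs => rw [add_comm, Int.add_mul_emod_self_right]
    rw [this, Int.emod_eq_of_lt hJ0 hJY]

-- two in-range entries with the same flat slot have the same key
theorem flat_inj (X Y : Int) (hY : 0 < Y) (e e' : (Int × Int) × Int)
    (hc : 0 ≤ e.1.1 ∧ e.1.1 < X ∧ 0 ≤ e.1.2 ∧ e.1.2 < Y)
    (hc' : 0 ≤ e'.1.1 ∧ e'.1.1 < X ∧ 0 ≤ e'.1.2 ∧ e'.1.2 < Y)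
    (heq : (e'.1.1 * Y + e'.1.2).toNat = (e.1.1 * Y + e.1.2).toNat) :
    e'.1 = e.1 := by
  have hq0 := flat_key Y e.1.1 e.1.2 hY hc.2.2.1 hc.2.2.2
  have hq1 := flat_key Y e'.1.1 e'.1.2 hY hc'.2.2.1 hc'.2.2.2
  have hge0 : 0 ≤ e.1.1 * Y + e.1.2 := by
    have := mul_nonneg hc.1 (le_of_lt hY); omega
  have hge1 : 0 ≤ e'.1.1 * Y + e'.1.2 := by
    have := mul_nonneg hc'.1 (le_of_lt hY); omega
  have heq' : e'.1.1 * Y + e'.1.2 = e.1.1 * Y + e.1.2 := by omega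
  exact Prod.ext (by rw [← hq1.1, ← hq0.1, heq']) (by rw [← hq1.2, ← hq0.2, heq'])

-- the in-range entry e₀ ends up at its flat slot (keys of l distinct)
theorem scatter_getElem?_of_mem (X Y : Int) (hY : 0 < Y)
    (l : List ((Int × Int) × Int)) (b : List Int) (e₀ : (Int × Int) × Int) (n : Nat)
    (hnd : (l.map Prod.fst).Nodup) (hmem : e₀ ∈ l)
    (hc : 0 ≤ e₀.1.1 ∧ e₀.1.1 < X ∧ 0 ≤ e₀.1.2 ∧ e₀.1.2 < Y)
    (hflat : (e₀.1.1 * Y + e₀.1.2).toNat = n) (hn : n < b.length) :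
    (l.foldl (pvScatter X Y) b)[n]? = some e₀.2 := by
  induction l generalizing b with
  | nil => cases hmem
  | cons e t ih =>
      simp only [List.map_cons, List.nodup_cons] at hnd
      rcases List.mem_cons.mp hmem with he | ht
      · subst he
        simp only [List.foldl_cons]
        rw [scatter_getElem?_of_none]
        · unfold pvScatter
          rw [if_pos hc, hflat, List.getElem?_set_self hn]
        · intro e' he' hc' hflat'
          exact hnd.1 ((flat_inj X Y hY e₀ e' hc hc' (hflat ▸ hflat')) ▸
            List.mem_map_of_mem he')
      · simp only [List.foldl_cons]
        exact ih _ hnd.2 ht (by rw [pvScatter_length]; exact hn)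

-- slot n of B's buffer holds the dict value at key (n / Y, n % Y) (default 0)
theorem scatter_getElem?_dict (X Y : Int) (hX : 0 < X) (hY : 0 < Y)
    (d : PySem.Dict (Int × Int) Int) (hnd : d.keys.Nodup) (n : Nat) (hn : n < (X * Y).toNat) :
    (d.items.foldl (pvScatter X Y) (List.replicate (X * Y).toNat 0))[n]?
      = some (d.getD ((n : Int) / Y, (n : Int) % Y) 0) := by
  have hXY : (n : Int) < X * Y := by omega
  have hiX : (n : Int) / Y < X := by
    rw [Int.ediv_lt_iff_lt_mul hY]; omega
  have hi0 : 0 ≤ (n : Int) / Y := Int.ediv_nonneg (by positivity) (le_of_lt hY)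
  have hj0 : 0 ≤ (n : Int) % Y := Int.emod_nonneg _ (by omega)
  have hjY : (n : Int) % Y < Y := Int.emod_lt_of_pos _ hY
  have hflatn : ((n : Int) / Y * Y + (n : Int) % Y).toNat = n := by
    have h := Int.ediv_add_emod (n : Int) Y
    have : (n : Int) / Y * Y + (n : Int) % Y = (n : Int) := by
      rw [mul_comm]; omega
    omega
  have hndi : (d.items.map Prod.fst).Nodup := hnd
  cases hget : d.get? ((n : Int) / Y, (n : Int) % Y) with
  | some v =>
      have hmem : (((n : Int) / Y, (n : Int) % Y), v) ∈ d.items :=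
        PySem.Dict.mem_items_of_get?_eq_some d hget
      rw [scatter_getElem?_of_mem X Y hY d.items _ (((n : Int) / Y, (n : Int) % Y), v) n
        hndi hmem ⟨hi0, hiX, hj0, hjY⟩ hflatn (by simp [hn]),
        PySem.Dict.getD_of_get?_eq_some d 0 hget]
  | none =>
      rw [scatter_getElem?_of_none, PySem.Dict.getD_of_get?_eq_none d 0 hget]
      · simp [hn]
      · intro e he hc hflat
        have hkey : e.1 = ((n : Int) / Y, (n : Int) % Y) :=
          flat_inj X Y hY (((n : Int) / Y, (n : Int) % Y), 0) e ⟨hi0, hiX, hj0, hjY⟩ hc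
            (by simpa [hflatn] using hflat)
        have : e.1 ∈ d.keys := PySem.Dict.mem_keys_of_mem_items d he
        rw [hkey] at this
        rw [PySem.Dict.get?_eq_none_iff_not_mem_keys] at hget
        exact hget this

-- A's inner loop appends one cell value per column
theorem inner_eq (d : PySem.Dict (Int × Int) Int) (i Y : Int) (r0 : List Int) :
    (PySem.List.pyRange 0 Y 1).foldl (fun result j =>
        if d.contains (i, j) then result ++ [d.getD (i, j) 0] else result ++ [0]) r0
      = r0 ++ (PySem.List.pyRange 0 Y 1).map (fun j => d.getD (i, j) 0) := by
  rw [PySem.List.foldl_congr_mem (g := fun (result : List Int) j => result ++ [d.getD (i, j) 0])]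
  · exact PySem.List.foldl_append_singleton_eq_map _ _ _
  · intro acc j _
    cases hc : d.contains (i, j) with
    | true => simp
    | false => rw [PySem.Dict.getD_of_not_contains d 0 hc]; simp

-- A is row-major flattening of the per-cell lookups
theorem A_eq_flatMap (p2 : List (Int × Int × Int)) (X Y : Int) :
    pd1 p2 X Y = (PySem.List.pyRange 0 X 1).flatMap (fun i =>
      (PySem.List.pyRange 0 Y 1).map (fun j => (pvToDict p2).getD (i, j) 0)) := by
  unfold pd1
  rw [PySem.List.foldl_congr_mem (g := fun (result : List Int) i =>
    result ++ (PySem.List.pyRange 0 Y 1).map (fun j => (pvToDict p2).getD (i, j) 0))]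
  · rw [PySem.List.foldl_append_eq_flatMap]; rfl
  · intro acc i _
    exact inner_eq (pvToDict p2) i Y acc

-- row-major flattening of an x × y grid, indexed by (n / y, n % y)
theorem range_flatMap (g : Nat → Nat → Int) (x y : Nat) :
    (List.range x).flatMap (fun i => (List.range y).map (g i))
      = (List.range (x * y)).map (fun n => g (n / y) (n % y)) := by
  induction x with
  | zero => simp
  | succ x ih =>
      rw [List.range_succ, List.flatMap_append, ih, Nat.succ_mul, List.range_add,
        List.map_append]
      congr 1
      simp only [List.flatMap_cons, List.flatMap_nil, List.append_nil, List.map_map]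
      refine List.map_congr_left ?_
      intro k hk
      have hky : k < y := List.mem_range.mp hk
      have hy : 0 < y := by omega
      have hdiv : (x * y + k) / y = x := by
        rw [mul_comm, Nat.mul_add_div hy, Nat.div_eq_of_lt hky, Nat.add_zero]
      have hmod : (x * y + k) % y = k := by
        rw [mul_comm, Nat.mul_add_mod, Nat.mod_eq_of_lt hky]
      simp [Function.comp, hdiv, hmod]

-- ===== VERDICT (by name: the statement is the Claim_ definition above) =====
theorem pd1_spec : Claim_equal_pd1 := by
  intro p2 X Y _
  unfold Spec_pd1
  by_cases hXY : X ≤ 0 ∨ Y ≤ 0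
  · unfold pd1 pd1_alt
    rw [if_pos hXY]
    rcases hXY with hX | hY
    · rw [PySem.List.pyRange_one_eq_nil hX]; rfl
    · rw [PySem.List.foldl_congr_mem (g := fun (r : List Int) _ => r)]
      · exact foldl_const _ _
      · intro acc i _
        rw [PySem.List.pyRange_one_eq_nil hY]; rfl
  · push_neg at hXY
    have hX : 0 < X := by omega
    have hY : 0 < Y := by omega
    set d := pvToDict p2 with hd
    have hnd : d.keys.Nodup := PySem.Dict.nodup_keys_ofList _
    lift X to ℕ using le_of_lt hX with x
    lift Y to ℕ using le_of_lt hY with y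
    have hy : 0 < y := by exact_mod_cast hY
    have hA : pd1 p2 x y = (List.range (x * y)).map
        (fun n => d.getD ((↑(n / y) : Int), (↑(n % y) : Int)) 0) := by
      rw [A_eq_flatMap, ← hd]
      simp only [PySem.List.pyRange_one, Int.sub_zero, Int.toNat_natCast, zero_add,
        List.flatMap_map, List.map_map, Function.comp]
      exact range_flatMap (fun i j => d.getD ((i : Int), (j : Int)) 0) x y
    have hN : ((x : Int) * (y : Int)).toNat = x * y := by
      rw [← Int.natCast_mul, Int.toNat_natCast]
    have hB : pd1_alt p2 x y = d.items.foldl (pvScatter x y)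
        (List.replicate ((x : Int) * (y : Int)).toNat 0) := by
      unfold pd1_alt
      rw [if_neg (by push_neg; exact ⟨hX, hY⟩), ← hd]
    have hl2 : (d.items.foldl (pvScatter (x : Int) (y : Int))
        (List.replicate ((x : Int) * (y : Int)).toNat 0)).length = x * y := by
      rw [scatter_foldl_length, List.length_replicate, hN]
    rw [hA, hB]
    refine List.ext_getElem? (fun n => ?_)
    by_cases hn : n < x * y
    · rw [List.getElem?_map, List.getElem?_range hn,
        scatter_getElem?_dict (x : Int) (y : Int) hX hY d hnd n (by rw [hN]; exact hn)]
      simp only [Option.map_some, Option.some.injEq, Int.natCast_ediv, Int.natCast_emod]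
    · rw [List.getElem?_eq_none (by simp; omega),
        List.getElem?_eq_none (by rw [hl2]; omega)]
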